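-- pv_equiv track=rewrite | github.com/DJ-Greenwood/Zero-Runs-in-the-Binary-Expansion-of-2 | final_paper/Code/new_code/Zero_Run.py | find_zero_runs
-- ===== SOURCE A (Python) =====
-- from typing import Dict, List, Tuple, Optional
--
-- def find_zero_runs(binary_expansion: List[int]) -> List[Tuple[int, int]]:
--     """Find all zero runs in the binary expansion."""
--     runs = []
--     current_run = 0
--     start_pos = None
--
--     for i, bit in enumerate(binary_expansion):
--         if bit == 0:
--             if start_pos is None:
--                 start_pos = i
--             current_run += 1
--         else:
--             if current_run > 0:
--                 runs.append((start_pos, current_run))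
--             current_run = 0
--             start_pos = None
--
--     if current_run > 0:
--         runs.append((start_pos, current_run))
--
--     return runs
-- ===== SOURCE B (Python) =====
-- from itertools import groupby
-- from typing import List, Tuple
--
-- def find_zero_runs(binary_expansion: List[int]) -> List[Tuple[int, int]]:
--     """Find all zero runs in the binary expansion (groupby-based)."""
--     runs = []
--     pos = 0
--     for is_zero, grp in groupby(binary_expansion, key=lambda b: b == 0):
--         n = len(list(grp))
--         if is_zero:
--             runs.append((pos, n))
--         pos += n
--     return runs
-- ===== Notes on version B (the rewrite author's own statement) =====
-- stated objective: idiomatic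
-- what changed: Replaces the hand-maintained run-tracking state machine (current_run counter, Optional start_pos, trailing flush) with itertools.groupby over the is-zero predicate plus a running position index; no trailing flush is needed.
import Mathlib
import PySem

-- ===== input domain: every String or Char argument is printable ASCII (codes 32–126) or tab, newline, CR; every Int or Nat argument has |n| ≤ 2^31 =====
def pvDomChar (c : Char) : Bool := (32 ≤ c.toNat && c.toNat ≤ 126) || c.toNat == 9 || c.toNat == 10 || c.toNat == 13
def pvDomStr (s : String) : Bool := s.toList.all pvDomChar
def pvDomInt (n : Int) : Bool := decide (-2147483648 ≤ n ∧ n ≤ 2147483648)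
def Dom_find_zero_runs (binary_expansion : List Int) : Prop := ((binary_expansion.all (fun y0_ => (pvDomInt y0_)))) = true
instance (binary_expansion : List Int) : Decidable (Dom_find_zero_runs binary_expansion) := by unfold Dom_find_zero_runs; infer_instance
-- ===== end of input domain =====

-- B replaces A's hand-rolled run-tracking state machine by an itertools.groupby pass (idiomatic).

-- ===== PORT A =====
-- A's for-loop over enumerate(...) plus the trailing flush, as structural recursion
-- carrying i, runs, current_run, start_pos; `start.getD 0` is only read when cur > 0,
-- where Python's start_pos is an int.
def pvALoop (l : List Int) (i : Int) (runs : List (Int × Int)) (cur : Int)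
    (start : Option Int) : List (Int × Int) :=
  match l with
  | [] => if cur > 0 then runs ++ [(start.getD 0, cur)] else runs
  | b :: rest =>
    if b == 0 then
      pvALoop rest (i + 1) runs (cur + 1) (if start.isNone then some i else start)
    else
      pvALoop rest (i + 1) (if cur > 0 then runs ++ [(start.getD 0, cur)] else runs) 0 none

def find_zero_runs (binary_expansion : List Int) : List (Int × Int) :=
  pvALoop binary_expansion 0 [] 0 none

-- ===== PORT B =====
-- groupby(binary_expansion, key = λ b, b == 0): each step takes one group (head plus
-- the maximal following run with the same key), emits (pos, len) when the key is True,
-- and advances pos by the group length.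
def pvBGo (l : List Int) (pos : Int) : List (Int × Int) :=
  match l with
  | [] => []
  | b :: rest =>
    let key := b == 0
    let grp := rest.takeWhile (fun x => (x == 0) == key)
    let r := rest.dropWhile (fun x => (x == 0) == key)
    let len : Int := (grp.length : Int) + 1
    (if key then [(pos, len)] else []) ++ pvBGo r (pos + len)
termination_by l.length
decreasing_by
  simp only [List.length_cons]
  exact Nat.lt_succ_of_le (List.length_dropWhile_le _ _)

def find_zero_runs_alt (binary_expansion : List Int) : List (Int × Int) :=
  pvBGo binary_expansion 0

-- ===== PRECONDITION & SPEC =====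
def Spec_find_zero_runs (binary_expansion : List Int) (out : List (Int × Int)) : Prop := out = find_zero_runs_alt binary_expansion
instance (binary_expansion : List Int) (out : List (Int × Int)) : Decidable (Spec_find_zero_runs binary_expansion out) := by unfold Spec_find_zero_runs; infer_instance

-- ===== CLAIM (what is proved, stated in full; the proofs are below) =====
def Claim_equal_find_zero_runs : Prop := ∀ (binary_expansion : List Int), Dom_find_zero_runs binary_expansion → Spec_find_zero_runs binary_expansion (find_zero_runs binary_expansion)

-- ===== LEMMAS AND PROOFS =====

-- Inside a zero run (cur > 0, start = some s), A's loop extends the run across the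
-- maximal zero prefix, flushes it, and lands back in the idle state.
theorem pvALoop_in_run (l : List Int) (pos : Int) (runs : List (Int × Int)) (s c : Int)
    (hc : 0 < c) :
    pvALoop l pos runs c (some s) =
      pvALoop (l.dropWhile (fun x => x == 0)) (pos + (l.takeWhile (fun x => x == 0)).length)
        (runs ++ [(s, c + (l.takeWhile (fun x => x == 0)).length)]) 0 none := by
  induction l generalizing pos runs c with
  | nil =>
      simp [pvALoop, hc]
  | cons b rest ih =>
      by_cases hb : b = 0
      · subst hb
        rw [pvALoop]
        have h := ih (pos + 1) runs (c + 1) (by omega)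
        simp only [List.takeWhile_cons, List.dropWhile_cons, beq_self_eq_true, if_true,
          Option.isNone_some, Bool.false_eq_true, if_false, List.length_cons]
        rw [h]
        push_cast
        ring_nf
      · have hb' : (b == 0) = false := by simp [hb]
        rw [pvALoop]
        simp only [List.takeWhile_cons, List.dropWhile_cons, hb', Bool.false_eq_true,
          if_false, List.length_nil, Option.getD_some, hc, if_true]
        rw [pvALoop]
        simp [hb']

-- Idle state over an all-nonzero prefix is a no-op (other than advancing the index).
theorem pvALoop_skip (g : List Int) (r : List Int) (pos : Int) (runs : List (Int × Int))
    (hg : ∀ x ∈ g, ¬ x = 0) :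
    pvALoop (g ++ r) pos runs 0 none = pvALoop r (pos + g.length) runs 0 none := by
  induction g generalizing pos with
  | nil => simp
  | cons b rest ih =>
      have hb : (b == 0) = false := by simp [hg b (by simp)]
      rw [List.cons_append, pvALoop]
      simp only [hb, Bool.false_eq_true, if_false, lt_irrefl]
      rw [ih (pos + 1) (fun x hx => hg x (List.mem_cons_of_mem _ hx))]
      congr 1
      push_cast [List.length_cons]
      ring

-- Main loop lemma: from the idle state, A's loop computes B's groups.
theorem pvALoop_eq_pvBGo (l : List Int) (pos : Int) (runs : List (Int × Int)) :
    pvALoop l pos runs 0 none = runs ++ pvBGo l pos := by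
  induction l, pos using pvBGo.induct generalizing runs with
  | case1 pos => simp [pvALoop, pvBGo]
  | case2 pos b rest key grp r len ih =>
    rw [pvBGo]
    by_cases hb : b = 0
    · subst hb
      have hfun : (fun x : Int => (x == 0) == true) = (fun x : Int => x == 0) := by
        funext x; cases h : (x == 0) <;> simp
      simp only [key, grp, r, len, beq_self_eq_true, hfun] at ih
      rw [pvALoop]
      simp only [beq_self_eq_true, hfun, if_true, Option.isNone_none, zero_add]
      rw [pvALoop_in_run rest (pos + 1) runs pos 1 (by omega)]
      have harith : pos + 1 + ((List.takeWhile (fun x : Int => x == 0) rest).length : Int) =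
          pos + (((List.takeWhile (fun x : Int => x == 0) rest).length : Int) + 1) := by ring
      rw [harith, ih]
      simp [List.append_assoc]
      ring_nf
    · have hb' : (b == 0) = false := by simp [hb]
      simp only [key, grp, r, len, hb'] at ih
      rw [pvALoop]
      simp only [hb', Bool.false_eq_true, if_false, lt_irrefl]
      have hsplit : List.takeWhile (fun x : Int => (x == 0) == false) rest ++
          List.dropWhile (fun x : Int => (x == 0) == false) rest = rest :=
        List.takeWhile_append_dropWhile
      conv_lhs => rw [← hsplit]
      rw [pvALoop_skip _ _ _ _ (by
        intro x hx
        have := List.mem_takeWhile_imp hx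
        simpa using this)]
      have harith : pos + 1 + ((List.takeWhile (fun x : Int => (x == 0) == false) rest).length : Int) =
          pos + (((List.takeWhile (fun x : Int => (x == 0) == false) rest).length : Int) + 1) := by ring
      rw [harith, ih]
      simp

-- ===== VERDICT (by name: the statement is the Claim_ definition above) =====
theorem find_zero_runs_spec : Claim_equal_find_zero_runs := by
  intro l _
  unfold Spec_find_zero_runs find_zero_runs find_zero_runs_alt
  simpa using pvALoop_eq_pvBGo l 0 []
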